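-- pv_equiv track=rewrite | github.com/Ae-Mc/PeptideSummaryAnalyzer | Classes/PeptideTables.py | GetRepresentativeForRowByCounts
-- ===== SOURCE A (Python) =====
-- from typing import Dict, List, Tuple
--
-- def GetRepresentativeForRowByCounts(
--     accessions: List[str], counts: Dict[str, int]
-- ) -> List[str]:
--     """Выбирает репрезентативный Accession на основе словаря с количеством
--     появлений каждого Accession.
--
--     Args:
--         accessions: список Accession, для которого выбирается
--             репрезентативный
--         counts: словарь с количеством появлений каждого Accession
--
--     Returns:
--         None: если
--     """
--     representativeAccession: Tuple[str, int] = ("", 0)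
--     variants = []
--     for accession in accessions:
--         if counts[accession] > representativeAccession[1]:
--             representativeAccession = (
--                 accession,
--                 counts[accession],
--             )
--             variants = [accession]
--         elif counts[accession] == representativeAccession[1]:
--             variants.append(accession)
--     return variants
-- ===== SOURCE B (Python) =====
-- from typing import Dict, List
--
-- def GetRepresentativeForRowByCounts(
--     accessions: List[str], counts: Dict[str, int]
-- ) -> List[str]:
--     maxCount = 0
--     for accession in accessions:
--         if counts[accession] > maxCount:
--             maxCount = counts[accession]
--     return [accession for accession in accessions if counts[accession] == maxCount]
-- ===== Notes on version B (the rewrite author's own statement) =====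
-- stated objective: simpler
-- what changed: Replaces the fused running-max-with-reset-and-append loop by a two-pass decomposition: first compute the maximum count (floored at 0, matching A's ('',0) sentinel), then filter the accessions whose count equals it, preserving order.
import Mathlib
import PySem

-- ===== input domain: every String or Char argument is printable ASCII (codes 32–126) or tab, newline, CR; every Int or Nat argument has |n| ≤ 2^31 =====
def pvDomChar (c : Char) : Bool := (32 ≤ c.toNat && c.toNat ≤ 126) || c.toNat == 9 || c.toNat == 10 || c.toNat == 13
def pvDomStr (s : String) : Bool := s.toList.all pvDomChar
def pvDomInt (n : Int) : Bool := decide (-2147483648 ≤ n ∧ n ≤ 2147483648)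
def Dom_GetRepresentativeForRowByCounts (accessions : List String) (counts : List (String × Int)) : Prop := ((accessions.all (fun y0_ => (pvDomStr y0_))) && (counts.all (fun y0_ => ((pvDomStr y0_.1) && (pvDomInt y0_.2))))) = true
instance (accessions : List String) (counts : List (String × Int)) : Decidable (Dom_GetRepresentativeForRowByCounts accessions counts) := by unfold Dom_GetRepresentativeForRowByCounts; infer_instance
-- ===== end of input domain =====

-- B replaces A's fused running-max-with-reset loop by a two-pass max-then-filter decomposition (same cost, simpler).
-- Shared dict primitive: counts[a] lookup (first match in the association list); none = KeyError.
def pvCnt (counts : List (String × Int)) (a : String) : Option Int :=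
  (counts.find? (fun p => p.1 == a)).map (·.2)

-- ===== PORT A =====
-- the loop over accessions with state (representativeAccession, variants)
def goA (counts : List (String × Int)) : List String → (String × Int) → List String → List String
  | [], _, vs => vs
  | a :: rest, rep, vs =>
    let c := (pvCnt counts a).getD 0
    if c > rep.2 then goA counts rest (a, c) [a]
    else if c = rep.2 then goA counts rest rep (vs ++ [a])
    else goA counts rest rep vs

def GetRepresentativeForRowByCounts (accessions : List String) (counts : List (String × Int)) : List String :=
  goA counts accessions ("", 0) []

-- ===== PORT B =====
def GetRepresentativeForRowByCounts_alt (accessions : List String) (counts : List (String × Int)) : List String :=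
  let maxCount : Int := accessions.foldl
    (fun m a => if (pvCnt counts a).getD 0 > m then (pvCnt counts a).getD 0 else m) 0
  accessions.filter (fun a => (pvCnt counts a).getD 0 == maxCount)

-- ===== PRECONDITION & SPEC =====
-- Pre_: every accession occurs in counts (otherwise the Python raises KeyError)
def Pre_GetRepresentativeForRowByCounts (accessions : List String) (counts : List (String × Int)) : Prop :=
  ∀ a ∈ accessions, (pvCnt counts a).isSome = true
instance (accessions : List String) (counts : List (String × Int)) : Decidable (Pre_GetRepresentativeForRowByCounts accessions counts) := by unfold Pre_GetRepresentativeForRowByCounts; infer_instance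
def pvWitness_GetRepresentativeForRowByCounts : List String × (List (String × Int)) :=
  (["a", "b", "a"], [("a", 2), ("b", 2)])
def Spec_GetRepresentativeForRowByCounts (accessions : List String) (counts : List (String × Int)) (out : List String) : Prop := out = GetRepresentativeForRowByCounts_alt accessions counts
instance (accessions : List String) (counts : List (String × Int)) (out : List String) : Decidable (Spec_GetRepresentativeForRowByCounts accessions counts out) := by unfold Spec_GetRepresentativeForRowByCounts; infer_instance

-- ===== CLAIM (what is proved, stated in full; the proofs are below) =====
def Claim_equal_GetRepresentativeForRowByCounts : Prop := ∀ (accessions : List String) (counts : List (String × Int)), Dom_GetRepresentativeForRowByCounts accessions counts → Pre_GetRepresentativeForRowByCounts accessions counts → Spec_GetRepresentativeForRowByCounts accessions counts (GetRepresentativeForRowByCounts accessions counts)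

-- ===== LEMMAS AND PROOFS =====
def pvStep (counts : List (String × Int)) (m : Int) (a : String) : Int :=
  if (pvCnt counts a).getD 0 > m then (pvCnt counts a).getD 0 else m

lemma goA_cons (counts : List (String × Int)) (a : String) (rest : List String)
    (s : String) (m : Int) (vs : List String) :
    goA counts (a :: rest) (s, m) vs =
      if (pvCnt counts a).getD 0 > m then goA counts rest (a, (pvCnt counts a).getD 0) [a]
      else if (pvCnt counts a).getD 0 = m then goA counts rest (s, m) (vs ++ [a])
      else goA counts rest (s, m) vs := rfl

lemma le_foldl_pvStep (counts : List (String × Int)) :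
    ∀ (l : List String) (m : Int), m ≤ l.foldl (pvStep counts) m := by
  intro l
  induction l with
  | nil => intro m; simp
  | cons a l ih =>
    intro m
    have h := ih (pvStep counts m a)
    have : m ≤ pvStep counts m a := by
      unfold pvStep; split <;> omega
    simpa [List.foldl] using le_trans this h

lemma goA_eq (counts : List (String × Int)) :
    ∀ (l : List String) (s : String) (m : Int) (vs : List String),
      goA counts l (s, m) vs =
        (if l.foldl (pvStep counts) m = m then vs else [])
          ++ l.filter (fun a => (pvCnt counts a).getD 0 == l.foldl (pvStep counts) m) := by
  intro l
  induction l with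
  | nil => intro s m vs; simp [goA]
  | cons a l ih =>
    intro s m vs
    have hF : ∀ m' : Int, (a :: l).foldl (pvStep counts) m' = l.foldl (pvStep counts) (pvStep counts m' a) := by
      intro m'; simp [List.foldl]
    by_cases h1 : (pvCnt counts a).getD 0 > m
    · -- reset branch
      have hstep : pvStep counts m a = (pvCnt counts a).getD 0 := by unfold pvStep; simp [h1]
      have hge := le_foldl_pvStep counts l ((pvCnt counts a).getD 0)
      have hFne : l.foldl (pvStep counts) ((pvCnt counts a).getD 0) ≠ m := by omega
      rw [goA_cons, if_pos h1, ih a ((pvCnt counts a).getD 0) [a], hF m, hstep]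
      simp only [List.filter_cons]
      by_cases h2 : l.foldl (pvStep counts) ((pvCnt counts a).getD 0) = (pvCnt counts a).getD 0
      · simp [h2]; intro h; omega
      · have hne : ((pvCnt counts a).getD 0 == l.foldl (pvStep counts) ((pvCnt counts a).getD 0)) = false := by
          simp only [beq_eq_false_iff_ne, ne_eq]; omega
        simp [h2, hFne, hne]
    · by_cases h2 : (pvCnt counts a).getD 0 = m
      · -- append branch
        have hstep : pvStep counts m a = m := by unfold pvStep; simp [h1]
        rw [goA_cons, if_neg h1, if_pos h2, ih s m (vs ++ [a]), hF m, hstep]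
        simp only [List.filter_cons]
        by_cases h3 : l.foldl (pvStep counts) m = m
        · have heq : ((pvCnt counts a).getD 0 == l.foldl (pvStep counts) m) = true := by
            simp only [beq_iff_eq]; omega
          simp [h3, h2]
        · have hne : ((pvCnt counts a).getD 0 == l.foldl (pvStep counts) m) = false := by
            simp only [beq_eq_false_iff_ne, ne_eq]; omega
          simp [h3, hne]
      · -- skip branch
        have hstep : pvStep counts m a = m := by unfold pvStep; simp [h1]
        rw [goA_cons, if_neg h1, if_neg h2, ih s m vs, hF m, hstep]
        have h1' : (pvCnt counts a).getD 0 < m := by omega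
        have hge := le_foldl_pvStep counts l m
        have hne : ((pvCnt counts a).getD 0 == l.foldl (pvStep counts) m) = false := by
          simp only [beq_eq_false_iff_ne, ne_eq]; omega
        simp [hne]

-- ===== VERDICT (by name: the statement is the Claim_ definition above) =====
theorem GetRepresentativeForRowByCounts_spec : Claim_equal_GetRepresentativeForRowByCounts := by
  intro accessions counts _ _
  unfold Spec_GetRepresentativeForRowByCounts GetRepresentativeForRowByCounts GetRepresentativeForRowByCounts_alt
  rw [goA_eq counts accessions "" 0 []]
  rw [show List.foldl (fun m a => if (pvCnt counts a).getD 0 > m then (pvCnt counts a).getD 0 else m) 0 accessions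
        = List.foldl (pvStep counts) 0 accessions from rfl]
  split <;> simp
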